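-- pv_equiv track=rewrite | github.com/ioaksenenko/neural_networks | 1_untagging_mask_maker/temp/dataprep.py | count_elements
-- ===== SOURCE A (Python) =====
-- def count_elements(dict, sequences, n=1):
--     res = []
--     for sequence in sequences:
--         res_seq = []
--         for i in range(len(dict)):
--             number = 0
--             if n > 0:
--                 for j in range(0, len(sequence) - n + 1, n):
--                     ngram = ''
--                     for k in range(n):
--                         ngram += sequence[j + k]
--                     if ngram == dict[i]:
--                         number += 1
--             else:
--                 for j in range(len(sequence)):
--                     if sequence[j] == dict[i]:
--                         number += 1
--             res_seq.append(number)
--         res.append(res_seq)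
--     return res
-- ===== SOURCE B (Python) =====
-- def count_elements(dict, sequences, n=1):
--     res = []
--     for sequence in sequences:
--         if n > 0:
--             tokens = [sequence[j:j + n] for j in range(0, len(sequence) - n + 1, n)]
--         else:
--             tokens = list(sequence)
--         counts = {}
--         for t in tokens:
--             counts[t] = counts.get(t, 0) + 1
--         res.append([counts.get(d, 0) for d in dict])
--     return res
-- ===== Notes on version B (the rewrite author's own statement) =====
-- stated objective: faster
-- what changed: Instead of rescanning the sequence and rebuilding every n-gram once per dictionary entry, B tokenises each sequence once, tallies the tokens in a dict, and reads each dictionary entry's count with one O(1) lookup.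
import Mathlib
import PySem

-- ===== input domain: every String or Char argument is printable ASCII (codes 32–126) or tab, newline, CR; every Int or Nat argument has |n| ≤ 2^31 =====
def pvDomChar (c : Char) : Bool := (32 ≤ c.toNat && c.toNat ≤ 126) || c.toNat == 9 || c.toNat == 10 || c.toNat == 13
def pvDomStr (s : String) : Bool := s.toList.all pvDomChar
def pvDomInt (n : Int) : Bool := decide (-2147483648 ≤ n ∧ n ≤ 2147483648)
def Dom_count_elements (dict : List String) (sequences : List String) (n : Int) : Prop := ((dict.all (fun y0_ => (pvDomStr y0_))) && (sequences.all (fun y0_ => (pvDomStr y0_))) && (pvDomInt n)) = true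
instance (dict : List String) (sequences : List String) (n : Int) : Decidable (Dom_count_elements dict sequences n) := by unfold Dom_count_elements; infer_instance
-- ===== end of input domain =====

-- B tokenises each sequence once and tallies tokens in a dict, replacing A's per-dictionary-entry rescan; same return value.

-- ===== PORT A =====
-- Strings are handled on the .toList (List Char) side throughout; the inner 'ngram += sequence[j+k]'
-- accumulates the code points, and 'ngram == dict[i]' compares against dict[i].toList — exact.
def count_elements (dict : List String) (sequences : List String) (n : Int) : List (List Int) :=
  sequences.foldl (fun res sequence =>
    let s := sequence.toList
    let res_seq := (PySem.List.pyRange 0 (dict.length : Int) 1).foldl (fun res_seq i =>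
      let number : Int :=
        if n > 0 then
          (PySem.List.pyRange 0 ((s.length : Int) - n + 1) n).foldl (fun number j =>
            let ngram := (PySem.List.pyRange 0 n 1).foldl (fun ngram k =>
              ngram ++ [PySem.List.pyGetD s (j + k) ' ']) []
            if ngram = (PySem.List.pyGetD dict i "").toList then number + 1 else number) 0
        else
          (PySem.List.pyRange 0 ((s.length : Int)) 1).foldl (fun number j =>
            if [PySem.List.pyGetD s j ' '] = (PySem.List.pyGetD dict i "").toList then number + 1 else number) 0
      res_seq ++ [number]) []
    res ++ [res_seq]) []

-- ===== PORT B =====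
def count_elements_alt (dict : List String) (sequences : List String) (n : Int) : List (List Int) :=
  sequences.foldl (fun res sequence =>
    let s := sequence.toList
    let tokens : List (List Char) :=
      if n > 0 then
        (PySem.List.pyRange 0 ((s.length : Int) - n + 1) n).map
          (fun j => PySem.List.slice s (some j) (some (j + n)))
      else s.map (fun c => [c])
    let counts := tokens.foldl (fun d t => d.modify t 0 (· + 1)) PySem.Dict.empty
    res ++ [dict.map (fun d => counts.getD d.toList 0)]) []

-- ===== PRECONDITION & SPEC =====
def Spec_count_elements (dict : List String) (sequences : List String) (n : Int) (out : List (List Int)) : Prop := out = count_elements_alt dict sequences n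
instance (dict : List String) (sequences : List String) (n : Int) (out : List (List Int)) : Decidable (Spec_count_elements dict sequences n out) := by unfold Spec_count_elements; infer_instance

-- ===== CLAIM (what is proved, stated in full; the proofs are below) =====
def Claim_equal_count_elements : Prop := ∀ (dict : List String) (sequences : List String) (n : Int), Dom_count_elements dict sequences n → Spec_count_elements dict sequences n (count_elements dict sequences n)

-- ===== LEMMAS AND PROOFS =====

lemma ngram_eq_slice (s : List Char) (n j : Int) (hn : 0 < n) (hj : 0 ≤ j)
    (hje : j + n ≤ (s.length : Int)) :
    (PySem.List.pyRange 0 n 1).foldl (fun ngram k =>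
      ngram ++ [PySem.List.pyGetD s (j + k) ' ']) [] =
    PySem.List.slice s (some j) (some (j + n)) := by
  rw [PySem.List.foldl_append_singleton_eq_map, PySem.List.slice_toNat s hj (by omega),
      PySem.List.pyRange_one, List.map_map]
  simp only [List.nil_append]
  apply List.ext_getElem
  · simp; omega
  · intro k h1 h2
    simp only [List.getElem_map, List.getElem_range, Function.comp_apply,
      List.getElem_take, List.getElem_drop]
    rw [PySem.List.pyGetD_eq_getElem s _ (by simp at h1; omega) (by simp at h1 ⊢; omega)]
    congr 1
    simp at h1; omega

lemma count_fold {α β : Type} [BEq α] [LawfulBEq α] [DecidableEq α] (J : List β) (f : β → α) (t : α) :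
    J.foldl (fun (number : Int) j => if f j = t then number + 1 else number) 0 =
    ((J.map f).count t : Int) := by
  have h := PySem.List.foldl_count_if (fun j => f j == t) J 0
  simp only [beq_iff_eq] at h
  rw [h, List.count_eq_countP, List.countP_map]
  simp [Function.comp_def]

lemma number_eq_count (s : List Char) (n : Int) (d : String) :
    (if n > 0 then
        (PySem.List.pyRange 0 ((s.length : Int) - n + 1) n).foldl (fun number : Int => fun j =>
          let ngram := (PySem.List.pyRange 0 n 1).foldl (fun ngram k =>
            ngram ++ [PySem.List.pyGetD s (j + k) ' ']) []
          if ngram = d.toList then number + 1 else number) 0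
      else
        (PySem.List.pyRange 0 ((s.length : Int)) 1).foldl (fun number : Int => fun j =>
          if [PySem.List.pyGetD s j ' '] = d.toList then number + 1 else number) 0) =
    ((if n > 0 then
        (PySem.List.pyRange 0 ((s.length : Int) - n + 1) n).map
          (fun j => PySem.List.slice s (some j) (some (j + n)))
      else s.map (fun c => [c])).count d.toList : Int) := by
  by_cases hn : n > 0
  · simp only [if_pos hn]
    have hcong := PySem.List.foldl_congr_mem
      (PySem.List.pyRange 0 ((s.length : Int) - n + 1) n)
      (fun number : Int => fun j =>
        let ngram := (PySem.List.pyRange 0 n 1).foldl (fun ngram k =>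
          ngram ++ [PySem.List.pyGetD s (j + k) ' ']) []
        if ngram = d.toList then number + 1 else number)
      (fun (number : Int) j =>
        if PySem.List.slice s (some j) (some (j + n)) = d.toList then number + 1 else number)
      0 ?_
    · rw [hcong]
      exact count_fold _ _ _
    · intro acc j hj
      rw [PySem.List.mem_pyRange_iff_of_pos hn] at hj
      simp only [ngram_eq_slice s n j hn (by omega) (by omega)]
  · simp only [if_neg hn]
    rw [PySem.List.foldl_pyRange_zero_pyGetD' s ' '
      (fun (number : Int) c => if [c] = d.toList then number + 1 else number) 0]
    exact count_fold s (fun c => [c]) d.toList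

-- ===== VERDICT (by name: the statement is the Claim_ definition above) =====
theorem count_elements_spec : Claim_equal_count_elements := by
  intro dict sequences n _
  unfold Spec_count_elements count_elements count_elements_alt
  refine PySem.List.foldl_congr_mem sequences _ _ [] ?_
  intro acc sequence _
  dsimp only
  congr 1
  rw [← PySem.Dict.counter_eq_foldl]
  rw [PySem.List.foldl_pyRange_zero_pyGetD' dict ""
    (fun (res_seq : List Int) d =>
      res_seq ++ [if n > 0 then
          (PySem.List.pyRange 0 ((sequence.toList.length : Int) - n + 1) n).foldl (fun number : Int => fun j =>
            let ngram := (PySem.List.pyRange 0 n 1).foldl (fun ngram k =>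
              ngram ++ [PySem.List.pyGetD sequence.toList (j + k) ' ']) []
            if ngram = d.toList then number + 1 else number) 0
        else
          (PySem.List.pyRange 0 ((sequence.toList.length : Int)) 1).foldl (fun number : Int => fun j =>
            if [PySem.List.pyGetD sequence.toList j ' '] = d.toList then number + 1 else number) 0]) []]
  rw [PySem.List.foldl_append_singleton_eq_map]
  simp only [List.nil_append, PySem.Dict.getD_counter]
  exact congrArg (fun l => [l]) (List.map_congr_left (fun d _ => number_eq_count sequence.toList n d))
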